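-- pv_equiv track=rewrite | github.com/wan-catherine/Leetcode | problems/N2919_Minimum_Increment_Operations_To_Make_Array_Beautiful.py | minIncrementOperations
-- ===== SOURCE A (Python) =====
-- from typing import List
--
-- def minIncrementOperations(nums: List[int], k: int) -> int:
--     length = len(nums)
--     dp = [0] * length
--     dp[0] = max(0, k - nums[0])
--     dp[1] = max(0, k - nums[1])
--     dp[2] = max(0, k - nums[2])
--     for i in range(3, length):
--         dp[i] = max(0, k - nums[i]) + min(dp[i-1], dp[i-2], dp[i-3])
--     return min(dp[length-3:])
-- ===== SOURCE B (Python) =====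
-- from typing import List
--
-- def minIncrementOperations(nums: List[int], k: int) -> int:
--     # Sliding-window-minimum DP: a monotonic deque of indices (dp values strictly
--     # increasing) supplies min(dp[i-3:i]) at the front, instead of A's explicit
--     # three-way min and final slice-min.
--     n = len(nums)
--     dp = []
--     dq = []  # indices into dp; dp values strictly increasing along dq
--     for i in range(n):
--         while dq and dq[0] < i - 3:
--             dq.pop(0)
--         c = max(0, k - nums[i])
--         v = c if i < 3 else c + dp[dq[0]]
--         dp.append(v)
--         while dq and dp[dq[-1]] >= v:
--             dq.pop()
--         dq.append(i)
--     while dq[0] < n - 3: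
--         dq.pop(0)
--     return dp[dq[0]]
-- ===== Notes on version B (the rewrite author's own statement) =====
-- stated objective: alternative
-- what changed: Replaces A's explicit three-way min recurrence over a dp array plus final slice-min with a monotonic-deque sliding-window-minimum: a deque of indices with strictly increasing dp values supplies min(dp[i-3:i]) at its front, and the final answer is read from the same deque.
import Mathlib
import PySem

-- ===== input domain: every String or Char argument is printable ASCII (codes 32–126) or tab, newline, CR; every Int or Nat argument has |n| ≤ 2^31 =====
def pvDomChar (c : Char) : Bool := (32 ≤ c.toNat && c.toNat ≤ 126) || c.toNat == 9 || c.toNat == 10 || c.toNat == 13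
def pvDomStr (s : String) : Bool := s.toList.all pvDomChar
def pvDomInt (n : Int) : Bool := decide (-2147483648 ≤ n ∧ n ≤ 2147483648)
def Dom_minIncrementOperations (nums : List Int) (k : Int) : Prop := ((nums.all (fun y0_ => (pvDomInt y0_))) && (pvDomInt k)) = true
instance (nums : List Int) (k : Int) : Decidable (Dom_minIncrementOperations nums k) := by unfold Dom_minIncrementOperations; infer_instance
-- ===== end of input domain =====

-- B replaces A's explicit three-way min recurrence + final slice-min by a monotonic-deque
-- sliding-window minimum (equality of RETURN values; neither mutates its arguments).

-- ===== PORT A =====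
-- A builds the whole dp array (dp[0..2], then dp[i] for i in range(3, len)) and returns min(dp[len-3:]).
def astep (nums : List Int) (k : Int) (dp : List Int) (i : Int) : List Int :=
  dp ++ [max 0 (k - PySem.List.pyGetD nums i 0) +
      min (min (PySem.List.pyGetD dp (i-1) 0) (PySem.List.pyGetD dp (i-2) 0))
          (PySem.List.pyGetD dp (i-3) 0)]

def minIncrementOperations (nums : List Int) (k : Int) : Int :=
  let length : Int := nums.length
  let dp : List Int :=
    [max 0 (k - PySem.List.pyGetD nums 0 0),
     max 0 (k - PySem.List.pyGetD nums 1 0),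
     max 0 (k - PySem.List.pyGetD nums 2 0)]
  let dp := (PySem.List.pyRange 3 length 1).foldl (astep nums k) dp
  (PySem.List.min? (PySem.List.slice dp (some (length - 3)) none) (fun y => y)).getD 0

-- ===== PORT B =====
-- One iteration of B's loop: pop stale fronts (while dq and dq[0] < i-3), compute v from the
-- deque front, append to dp, pop dominated backs (while dq and dp[dq[-1]] >= v), push i.
-- The while-loops over the deque ends are ported as dropWhile from the respective end
-- (exact: a Python while popping at one end while its head test holds IS dropWhile there).
-- dp[dq[0]] / dp[dq[-1]] are in range whenever Python reaches them, so getD's default is never used.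
def bstep (nums : List Int) (k : Int) (st : List Int × List Nat) (i : Nat) : List Int × List Nat :=
  let dp := st.1
  let dq := st.2.dropWhile (fun j => decide (j < i - 3))
  let c := max 0 (k - nums.getD i 0)
  let v := if i < 3 then c else c + dp.getD (dq.headD 0) 0
  let dp := dp ++ [v]
  let dq := (dq.reverse.dropWhile (fun j => decide (v ≤ dp.getD j 0))).reverse
  (dp, dq ++ [i])

def minIncrementOperations_alt (nums : List Int) (k : Int) : Int :=
  let n := nums.length
  let st := (List.range n).foldl (bstep nums k) ([], [])
  let dq := st.2.dropWhile (fun j => decide (j < n - 3))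
  st.1.getD (dq.headD 0) 0

-- ===== PRECONDITION & SPEC =====
-- Python A raises IndexError when len(nums) < 3 (dp[0..2] assignments); those inputs are excluded.
def Pre_minIncrementOperations (nums : List Int) (k : Int) : Prop := 3 ≤ nums.length
instance (nums : List Int) (k : Int) : Decidable (Pre_minIncrementOperations nums k) := by unfold Pre_minIncrementOperations; infer_instance
def pvWitness_minIncrementOperations : List Int × Int := ([1, 2, 3, 0, 5], 4)

def Spec_minIncrementOperations (nums : List Int) (k : Int) (out : Int) : Prop := out = minIncrementOperations_alt nums k
instance (nums : List Int) (k : Int) (out : Int) : Decidable (Spec_minIncrementOperations nums k out) := by unfold Spec_minIncrementOperations; infer_instance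

-- ===== CLAIM (what is proved, stated in full; the proofs are below) =====
def Claim_equal_minIncrementOperations : Prop := ∀ (nums : List Int) (k : Int), Dom_minIncrementOperations nums k → Pre_minIncrementOperations nums k → Spec_minIncrementOperations nums k (minIncrementOperations nums k)

-- ===== LEMMAS AND PROOFS =====

-- The common recurrence both programs compute: pvF i = dp[i].
def pvF (nums : List Int) (k : Int) : Nat → Int
  | i =>
    if i < 3 then max 0 (k - PySem.List.pyGetD nums (i : Int) 0)
    else max 0 (k - PySem.List.pyGetD nums (i : Int) 0) +
      min (min (pvF nums k (i-1)) (pvF nums k (i-2))) (pvF nums k (i-3))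
termination_by i => i
decreasing_by all_goals omega

-- dq after i+1 iterations = indices j ≥ i-3 that are strict suffix minima of dp[0..i].
def pvMinima (nums : List Int) (k : Int) (m : Nat) : List Nat :=
  (List.range m).filter (fun j => decide (m ≤ j + 4) && decide (∀ j' < m, j < j' → pvF nums k j < pvF nums k j'))

-- generic: a head-test pop-loop on a list whose predicate propagates backwards is a filter
lemma dropWhile_eq_filter_not {α : Type} (p : α → Bool) :
    ∀ l : List α, l.Pairwise (fun a b => p b = true → p a = true) →
      l.dropWhile p = l.filter (fun a => !p a) := by
  intro l hl
  induction l with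
  | nil => rfl
  | cons a t ih =>
    rw [List.pairwise_cons] at hl
    by_cases h : p a = true
    · simp [List.dropWhile_cons, List.filter_cons, h, ih hl.2]
    · simp only [Bool.not_eq_true] at h
      have hb : ∀ b ∈ t, p b = false := by
        intro b hbmem
        cases hpb : p b with
        | false => rfl
        | true =>
          have h2 := hl.1 b hbmem hpb
          rw [h2] at h
          exact absurd h (by simp)
      rw [List.dropWhile_cons, List.filter_cons]
      rw [List.filter_eq_self.mpr (fun b hb2 => by simp [hb b hb2])]
      simp [h]

lemma pvMinima_sorted (nums : List Int) (k : Int) (m : Nat) :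
    (pvMinima nums k m).Pairwise (· < ·) :=
  (List.pairwise_lt_range).filter _

-- after the front pop with threshold m-3: the window-[m-3,m) suffix minima
def pvWin (nums : List Int) (k : Int) (m : Nat) : List Nat :=
  (List.range m).filter (fun j => decide (m ≤ j + 3) && decide (∀ j' < m, j < j' → pvF nums k j < pvF nums k j'))

lemma mem_pvWin (nums : List Int) (k : Int) (m j : Nat) :
    j ∈ pvWin nums k m ↔ j < m ∧ m ≤ j + 3 ∧ (∀ j' < m, j < j' → pvF nums k j < pvF nums k j') := by
  simp [pvWin, and_assoc]

lemma pvWin_sorted (nums : List Int) (k : Int) (m : Nat) :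
    (pvWin nums k m).Pairwise (· < ·) :=
  (List.pairwise_lt_range).filter _

-- the front pop turns pvMinima into pvWin
lemma frontPop_eq (nums : List Int) (k : Int) (m : Nat) :
    (pvMinima nums k m).dropWhile (fun j => decide (j < m - 3)) = pvWin nums k m := by
  rw [dropWhile_eq_filter_not _ _
    ((pvMinima_sorted nums k m).imp (by intro a b hab; simp only [decide_eq_true_eq]; omega))]
  unfold pvMinima pvWin
  rw [List.filter_filter]
  apply List.filter_congr
  intro j hj
  by_cases hs : (∀ j' < m, j < j' → pvF nums k j < pvF nums k j') <;>
    by_cases h3 : m ≤ j + 3 <;> by_cases h4 : m ≤ j + 4 <;> simp [hs, h3, h4] <;> omega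

-- the deque is never empty when m ≥ 1: m-1 is always a member of pvWin
lemma last_mem_pvWin (nums : List Int) (k : Int) (m : Nat) (hm : 1 ≤ m) :
    m - 1 ∈ pvWin nums k m := by
  rw [mem_pvWin]
  refine ⟨by omega, by omega, ?_⟩
  intro j' h1 h2
  omega

-- every window index is dominated by a pvWin member at or after it
lemma pvWin_dominates (nums : List Int) (k : Int) (m : Nat) :
    ∀ t, t < m → m ≤ t + 3 →
      ∃ x ∈ pvWin nums k m, t ≤ x ∧ pvF nums k x ≤ pvF nums k t := by
  suffices H : ∀ d t, m - t ≤ d → t < m → m ≤ t + 3 →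
      ∃ x ∈ pvWin nums k m, t ≤ x ∧ pvF nums k x ≤ pvF nums k t by
    intro t ht hw
    exact H m t (by omega) ht hw
  intro d
  induction d with
  | zero => intro t hd ht hw; omega
  | succ d ih =>
    intro t hd ht hw
    by_cases hs : ∀ j' < m, t < j' → pvF nums k t < pvF nums k j'
    · exact ⟨t, (mem_pvWin nums k m t).mpr ⟨ht, hw, hs⟩, le_refl t, le_refl _⟩
    · push_neg at hs
      obtain ⟨j', hj'm, htj', hle⟩ := hs
      obtain ⟨x, hx, hj'x, hfx⟩ := ih j' (by omega) hj'm (by omega)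
      exact ⟨x, hx, by omega, le_trans hfx hle⟩

-- the head of pvWin carries the minimum dp value over the window [m-3, m)
lemma pvWin_head (nums : List Int) (k : Int) (m : Nat) (hm : 3 ≤ m) :
    pvF nums k ((pvWin nums k m).headD 0)
      = min (min (pvF nums k (m-3)) (pvF nums k (m-2))) (pvF nums k (m-1)) := by
  cases hL : pvWin nums k m with
  | nil => exact absurd (last_mem_pvWin nums k m (by omega)) (by rw [hL]; simp)
  | cons j0 rest =>
    have hj0mem : j0 ∈ pvWin nums k m := by rw [hL]; exact List.mem_cons_self
    have hj0 := (mem_pvWin nums k m j0).mp hj0mem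
    have hlt : ∀ x ∈ rest, j0 < x := by
      have hp := pvWin_sorted nums k m
      rw [hL, List.pairwise_cons] at hp
      exact hp.1
    have hmin : ∀ x ∈ pvWin nums k m, pvF nums k j0 ≤ pvF nums k x := by
      intro x hx
      rw [hL] at hx
      rcases List.mem_cons.mp hx with h | h
      · rw [h]
      · have hxm := (mem_pvWin nums k m x).mp (by rw [hL]; exact List.mem_cons_of_mem _ h)
        exact le_of_lt (hj0.2.2 x hxm.1 (hlt x h))
    have hle : ∀ t, t < m → m ≤ t + 3 → pvF nums k j0 ≤ pvF nums k t := by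
      intro t ht hw
      obtain ⟨x, hx, _, hfx⟩ := pvWin_dominates nums k m t ht hw
      exact le_trans (hmin x hx) hfx
    have h1 := hle (m-1) (by omega) (by omega)
    have h2 := hle (m-2) (by omega) (by omega)
    have h3 := hle (m-3) (by omega) (by omega)
    simp only [List.headD_cons]
    have hcases : j0 = m-3 ∨ j0 = m-2 ∨ j0 = m-1 := by omega
    apply le_antisymm
    · exact le_min (le_min h3 h2) h1
    · rcases hcases with h | h | h <;> rw [h]
      · exact le_trans (min_le_left _ _) (min_le_left _ _)
      · exact le_trans (min_le_left _ _) (min_le_right _ _)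
      · exact min_le_right _ _

lemma pv_decide_and (p q : Prop) [Decidable p] [Decidable q] :
    decide (p ∧ q) = (decide p && decide q) := by
  by_cases hp : p <;> by_cases hq : q <;> simp [hp, hq]

lemma getD_mapF (f : Nat → Int) (n i : Nat) (d : Int) (h : i < n) :
    ((List.range n).map f).getD i d = f i := by
  simp [List.getD_eq_getElem?_getD, h]

-- F is strictly increasing along pvWin
lemma pvWin_strictF (nums : List Int) (k : Int) (m a b : Nat)
    (ha : a ∈ pvWin nums k m) (hb : b ∈ pvWin nums k m) (hab : a < b) :
    pvF nums k a < pvF nums k b := by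
  have ha' := (mem_pvWin nums k m a).mp ha
  have hb' := (mem_pvWin nums k m b).mp hb
  exact ha'.2.2 b hb'.1 hab

-- one iteration of B's loop advances the invariant
lemma bstep_eq (nums : List Int) (k : Int) (m : Nat) :
    bstep nums k ((List.range m).map (pvF nums k), pvMinima nums k m) m
      = ((List.range (m+1)).map (pvF nums k), pvMinima nums k (m+1)) := by
  have hv : (if m < 3 then max 0 (k - nums.getD m 0)
      else max 0 (k - nums.getD m 0) +
        ((List.range m).map (pvF nums k)).getD ((pvWin nums k m).headD 0) 0) = pvF nums k m := by
    by_cases h3 : m < 3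
    · rw [if_pos h3, pvF, if_pos h3, PySem.List.pyGetD_natCast]
    · rw [if_neg h3]
      have hne : pvWin nums k m ≠ [] := by
        intro h
        exact absurd (last_mem_pvWin nums k m (by omega)) (by rw [h]; simp)
      have hmem : (pvWin nums k m).headD 0 ∈ pvWin nums k m := by
        cases hL : pvWin nums k m with
        | nil => exact absurd hL hne
        | cons j0 rest => exact List.mem_cons_self
      have hlt : (pvWin nums k m).headD 0 < m := ((mem_pvWin nums k m _).mp hmem).1
      rw [getD_mapF _ _ _ _ hlt, pvWin_head nums k m (by omega)]
      conv_rhs => rw [pvF]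
      rw [if_neg h3, PySem.List.pyGetD_natCast]
      have hmm : ∀ a b c : Int, min (min a b) c = min (min c b) a := by
        intro a b c
        rcases le_total a b with h | h <;> rcases le_total b c with h' | h' <;>
          rcases le_total a c with h'' | h'' <;>
          simp [min_def, h, h', h''] <;> omega
      rw [hmm]
  have hdp2 : (List.range m).map (pvF nums k) ++ [pvF nums k m]
      = (List.range (m+1)).map (pvF nums k) := by
    rw [List.range_succ, List.map_append]; rfl
  have hback : ((pvWin nums k m).reverse.dropWhile
        (fun j => decide (pvF nums k m ≤ ((List.range (m+1)).map (pvF nums k)).getD j 0))).reverse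
        ++ [m] = pvMinima nums k (m+1) := by
    rw [dropWhile_eq_filter_not _ _ ?hpair]
    case hpair =>
      rw [List.pairwise_reverse]
      refine List.Pairwise.imp_of_mem ?_ (pvWin_sorted nums k m)
      intro a b ha hb hab
      have ham := ((mem_pvWin nums k m a).mp ha).1
      have hbm := ((mem_pvWin nums k m b).mp hb).1
      rw [getD_mapF _ _ _ _ (by omega), getD_mapF _ _ _ _ (by omega)]
      simp only [decide_eq_true_eq]
      intro h
      exact le_of_lt (lt_of_le_of_lt h (pvWin_strictF nums k m a b ha hb hab))
    rw [List.filter_reverse, List.reverse_reverse]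
    rw [List.filter_congr (l := pvWin nums k m)
        (q := fun j => decide (pvF nums k j < pvF nums k m)) ?hpt]
    case hpt =>
      intro j hj
      have hjm := ((mem_pvWin nums k m j).mp hj).1
      rw [getD_mapF _ _ _ _ (by omega)]
      by_cases h : pvF nums k m ≤ pvF nums k j <;> simp [h] <;> omega
    unfold pvWin pvMinima
    rw [List.filter_filter, List.range_succ, List.filter_append]
    have hPm : ((fun j => decide (m+1 ≤ j + 4) &&
        decide (∀ j' < m+1, j < j' → pvF nums k j < pvF nums k j')) m) = true := by
      simp only [Bool.and_eq_true, decide_eq_true_eq]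
      exact ⟨by omega, by intro j' h1 h2; omega⟩
    rw [show List.filter (fun j => decide (m+1 ≤ j + 4) &&
        decide (∀ j' < m+1, j < j' → pvF nums k j < pvF nums k j')) [m] = [m] from by
      simp only [List.filter_cons, List.filter_nil, hPm, if_pos]]
    congr 1
    apply List.filter_congr
    intro j hj
    have hjm : j < m := List.mem_range.mp hj
    have hsplit : (∀ j' < m+1, j < j' → pvF nums k j < pvF nums k j') ↔
        ((∀ j' < m, j < j' → pvF nums k j < pvF nums k j') ∧ pvF nums k j < pvF nums k m) := by
      constructor
      · intro h
        exact ⟨fun j' h1 h2 => h j' (by omega) h2, h m (by omega) hjm⟩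
      · rintro ⟨hh1, hh2⟩ j' hj' hlt
        rcases Nat.lt_succ_iff_lt_or_eq.mp hj' with h | h
        · exact hh1 j' h hlt
        · rw [h]; exact hh2
    have e1 : decide (∀ j' < m+1, j < j' → pvF nums k j < pvF nums k j') =
        (decide (∀ j' < m, j < j' → pvF nums k j < pvF nums k j') &&
          decide (pvF nums k j < pvF nums k m)) := by
      rw [decide_eq_decide.mpr hsplit, pv_decide_and]
    rw [e1, decide_eq_decide.mpr (show (m+1 ≤ j+4) ↔ (m ≤ j+3) from by omega)]
    simp [Bool.and_comm, Bool.and_left_comm, Bool.and_assoc]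
    all_goals infer_instance
  show bstep nums k ((List.range m).map (pvF nums k), pvMinima nums k m) m = _
  rw [bstep]
  simp only [frontPop_eq]
  rw [hv, hdp2, hback]

-- B's loop invariant
lemma bloop_inv (nums : List Int) (k : Int) :
    ∀ m, m ≤ nums.length →
      (List.range m).foldl (bstep nums k) ([], []) =
        ((List.range m).map (pvF nums k), pvMinima nums k m) := by
  intro m
  induction m with
  | zero => intro _; simp [pvMinima]
  | succ m ih =>
    intro hm1
    rw [List.range_succ, List.foldl_append, ih (by omega)]
    simp only [List.foldl_cons, List.foldl_nil]
    rw [← List.range_succ]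
    exact bstep_eq nums k m


-- A's loop invariant
lemma aloop_inv (nums : List Int) (k : Int) :
    ∀ m, 3 ≤ m → m ≤ nums.length →
      (PySem.List.pyRange 3 (m : Int) 1).foldl (astep nums k)
        [max 0 (k - PySem.List.pyGetD nums 0 0),
         max 0 (k - PySem.List.pyGetD nums 1 0),
         max 0 (k - PySem.List.pyGetD nums 2 0)] =
      (List.range m).map (pvF nums k) := by
  intro m hm
  induction m, hm using Nat.le_induction with
  | base =>
    intro _
    rw [PySem.List.pyRange_one_eq_nil (by norm_num)]
    simp only [List.foldl_nil]
    rw [show List.range 3 = [0, 1, 2] from rfl]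
    simp only [List.map_cons, List.map_nil]
    have e0 : pvF nums k 0 = max 0 (k - PySem.List.pyGetD nums 0 0) := by rw [pvF]; norm_num
    have e1 : pvF nums k 1 = max 0 (k - PySem.List.pyGetD nums 1 0) := by rw [pvF]; norm_num
    have e2 : pvF nums k 2 = max 0 (k - PySem.List.pyGetD nums 2 0) := by rw [pvF]; norm_num
    rw [e0, e1, e2]
  | succ m hm3 ih =>
    intro hlen
    rw [show ((m + 1 : Nat) : Int) = (m : Int) + 1 from by push_cast; ring]
    rw [PySem.List.pyRange_one_succ_right (by exact_mod_cast hm3)]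
    rw [List.foldl_append, ih (by omega)]
    simp only [List.foldl_cons, List.foldl_nil]
    unfold astep
    rw [show ((m : Int) - 1) = ((m - 1 : Nat) : Int) from by omega,
        show ((m : Int) - 2) = ((m - 2 : Nat) : Int) from by omega,
        show ((m : Int) - 3) = ((m - 3 : Nat) : Int) from by omega]
    rw [PySem.List.pyGetD_natCast, PySem.List.pyGetD_natCast, PySem.List.pyGetD_natCast,
        PySem.List.pyGetD_natCast]
    rw [getD_mapF _ _ _ _ (by omega), getD_mapF _ _ _ _ (by omega), getD_mapF _ _ _ _ (by omega)]
    rw [List.range_succ, List.map_append]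
    congr 1
    simp only [List.map_cons, List.map_nil]
    have hFm : pvF nums k m = max 0 (k - nums.getD m 0) +
        min (min (pvF nums k (m-1)) (pvF nums k (m-2))) (pvF nums k (m-3)) := by
      rw [pvF]; rw [if_neg (by omega), PySem.List.pyGetD_natCast]
    rw [hFm]

-- ===== VERDICT (by name: the statement is the Claim_ definition above) =====
theorem minIncrementOperations_spec : Claim_equal_minIncrementOperations := by
  intro nums k _hdom hpre
  unfold Pre_minIncrementOperations at hpre
  unfold Spec_minIncrementOperations minIncrementOperations minIncrementOperations_alt
  simp only []
  rw [bloop_inv nums k nums.length (le_refl _)]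
  rw [aloop_inv nums k nums.length (by omega) (le_refl _)]
  simp only []
  rw [frontPop_eq]
  -- B side value: pvF at the head of pvWin n
  have hne : pvWin nums k nums.length ≠ [] := by
    intro h
    exact absurd (last_mem_pvWin nums k nums.length (by omega)) (by rw [h]; simp)
  have hmem : (pvWin nums k nums.length).headD 0 ∈ pvWin nums k nums.length := by
    cases hL : pvWin nums k nums.length with
    | nil => exact absurd hL hne
    | cons j0 rest => exact List.mem_cons_self
  have hlt : (pvWin nums k nums.length).headD 0 < nums.length :=
    ((mem_pvWin nums k nums.length _).mp hmem).1
  rw [getD_mapF _ _ _ _ hlt, pvWin_head nums k nums.length (by omega)]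
  -- A side: the slice keeps exactly the last three dp values
  rw [PySem.List.slice_from _ (by omega)]
  rw [show ((nums.length : Int) - 3).toNat = nums.length - 3 from by omega]
  rw [← List.map_drop]
  have hdrop : List.drop (nums.length - 3) (List.range nums.length)
      = [nums.length - 3, nums.length - 3 + 1, nums.length - 3 + 2] := by
    obtain ⟨a, ha⟩ : ∃ a, nums.length = a + 3 := ⟨nums.length - 3, by omega⟩
    rw [ha]
    rw [show a + 3 - 3 = a from by omega]
    rw [show a + 3 = ((a + 1) + 1) + 1 from rfl, List.range_succ, List.range_succ,
        List.range_succ]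
    rw [show a = (List.range a).length from (List.length_range (n := a)).symm]
    simp [List.append_assoc]
  rw [hdrop]
  simp only [List.map_cons, List.map_nil]
  rw [PySem.List.min?_id_cons]
  simp only [List.foldl_cons, List.foldl_nil, Option.getD_some]
  rw [show nums.length - 3 + 1 = nums.length - 2 from by omega,
      show nums.length - 3 + 2 = nums.length - 1 from by omega]
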